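-- pv_equiv track=rewrite | github.com/pritice/VLN-UAV | nav_core/mapping.py | semantic_id_from_label
-- ===== SOURCE A (Python) =====
-- from typing import Tuple
--
-- DEFAULT_SEMANTIC_LABELS = [
--     "dark",
--     "red",
--     "green",
--     "yellow",
--     "blue",
--     "magenta",
--     "cyan",
--     "white",
-- ]
--
-- def semantic_id_from_label(label: str) -> Tuple[int, ...]:
--     """Return semantic IDs that match a coarse label or alias."""
--
--     if label in DEFAULT_SEMANTIC_LABELS:
--         return (DEFAULT_SEMANTIC_LABELS.index(label),)
--
--     alias = {
--         "water": ("blue", "cyan"),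
--         "road": ("dark",),
--         "vegetation": ("green",),
--     }
--     if label in alias:
--         return tuple(DEFAULT_SEMANTIC_LABELS.index(name) for name in alias[label])
--     return tuple()
-- ===== SOURCE B (Python) =====
-- DEFAULT_SEMANTIC_LABELS = [
--     "dark",
--     "red",
--     "green",
--     "yellow",
--     "blue",
--     "magenta",
--     "cyan",
--     "white",
-- ]
--
-- _ALIASES = {
--     "water": ("blue", "cyan"),
--     "road": ("dark",),
--     "vegetation": ("green",),
-- }
--
--
-- def semantic_id_from_label(label: str):
--     # Normalize-then-filter: first expand an alias to its member color names
--     # (a direct label expands to itself), then a single enumerate pass collects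
--     # the positions of the requested names in label-list order.
--     targets = set(_ALIASES.get(label, (label,)))
--     return tuple(i for i, name in enumerate(DEFAULT_SEMANTIC_LABELS) if name in targets)
-- ===== Notes on version B (the rewrite author's own statement) =====
-- stated objective: alternative
-- what changed: Replaced A's branch-and-scan (membership test plus repeated .index scans, with a separate alias branch) by a normalize-then-filter pipeline: the label is first expanded to a set of target color names (aliases expand to their members, anything else to itself), then a single enumerate pass over the label list collects the matching positions.
import Mathlib
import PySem

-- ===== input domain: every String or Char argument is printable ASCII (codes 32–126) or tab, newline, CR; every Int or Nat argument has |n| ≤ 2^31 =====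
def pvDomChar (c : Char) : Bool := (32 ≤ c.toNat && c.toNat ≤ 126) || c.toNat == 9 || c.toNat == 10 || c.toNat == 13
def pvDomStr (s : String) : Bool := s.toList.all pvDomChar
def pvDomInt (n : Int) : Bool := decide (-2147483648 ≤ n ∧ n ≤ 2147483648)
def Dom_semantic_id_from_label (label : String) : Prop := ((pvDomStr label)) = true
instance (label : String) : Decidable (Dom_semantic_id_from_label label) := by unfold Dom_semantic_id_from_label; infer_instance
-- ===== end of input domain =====

-- ===== PORT A =====
-- B replaces A's branch-and-scan (membership test, .index scans, alias dict branch) by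
-- normalize-then-filter: expand the label to a set of target color names, then one
-- enumerate pass collecting matching positions (alternative decomposition; same values).
def pvDefaultSemanticLabels : List String :=
  ["dark", "red", "green", "yellow", "blue", "magenta", "cyan", "white"]

-- literal port of A; .index never fails where it is called (guarded by membership / alias
-- values drawn from the label list), so the getD 0 default is never used
def semantic_id_from_label (label : String) : List Int :=
  if pvDefaultSemanticLabels.contains label then
    [((PySem.List.index? pvDefaultSemanticLabels label).getD 0 : Int)]
  else
    let aliasD : PySem.Dict String (List String) :=
      PySem.Dict.ofList [("water", ["blue", "cyan"]), ("road", ["dark"]), ("vegetation", ["green"])]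
    match aliasD.get? label with
    | some names => names.map (fun n => ((PySem.List.index? pvDefaultSemanticLabels n).getD 0 : Int))
    | none => []

-- ===== PORT B =====
def pvAliases : PySem.Dict String (List String) :=
  PySem.Dict.ofList [("water", ["blue", "cyan"]), ("road", ["dark"]), ("vegetation", ["green"])]

def semantic_id_from_label_alt (label : String) : List Int :=
  let targets : PySem.Set String := PySem.Set.ofList ((pvAliases.get? label).getD [label])
  ((PySem.List.enumerate pvDefaultSemanticLabels).filter (fun p => targets.contains p.2)).map
    (fun p => p.1)

-- ===== PRECONDITION & SPEC =====
def Spec_semantic_id_from_label (label : String) (out : List Int) : Prop := out = semantic_id_from_label_alt label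
instance (label : String) (out : List Int) : Decidable (Spec_semantic_id_from_label label out) := by unfold Spec_semantic_id_from_label; infer_instance

-- ===== CLAIM (what is proved, stated in full; the proofs are below) =====
def Claim_equal_semantic_id_from_label : Prop := ∀ (label : String), Dom_semantic_id_from_label label → Spec_semantic_id_from_label label (semantic_id_from_label label)

-- ===== LEMMAS AND PROOFS =====

-- ===== VERDICT (by name: the statement is the Claim_ definition above) =====
theorem semantic_id_from_label_spec : Claim_equal_semantic_id_from_label := by
  intro label _
  unfold Spec_semantic_id_from_label
  by_cases h1 : label = "dark"; · subst h1; decide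
  by_cases h2 : label = "red"; · subst h2; decide
  by_cases h3 : label = "green"; · subst h3; decide
  by_cases h4 : label = "yellow"; · subst h4; decide
  by_cases h5 : label = "blue"; · subst h5; decide
  by_cases h6 : label = "magenta"; · subst h6; decide
  by_cases h7 : label = "cyan"; · subst h7; decide
  by_cases h8 : label = "white"; · subst h8; decide
  by_cases h9 : label = "water"; · subst h9; decide
  by_cases h10 : label = "road"; · subst h10; decide
  by_cases h11 : label = "vegetation"; · subst h11; decide
  have hA : semantic_id_from_label label = [] := by
    unfold semantic_id_from_label
    simp [pvDefaultSemanticLabels, PySem.Dict.ofList, PySem.Dict.empty, PySem.Dict.update,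
      PySem.Dict.get?, PySem.Dict.insert,
      h1, h2, h3, h4, h5, h6, h7, h8, Ne.symm h9, Ne.symm h10, Ne.symm h11]
  have hB : semantic_id_from_label_alt label = [] := by
    unfold semantic_id_from_label_alt pvAliases
    simp [pvDefaultSemanticLabels, PySem.Dict.ofList, PySem.Dict.empty, PySem.Dict.update,
      PySem.Dict.get?, PySem.Dict.insert, PySem.Set.ofList, PySem.Set.contains,
      PySem.List.enumerate,
      Ne.symm h1, Ne.symm h2, Ne.symm h3, Ne.symm h4, Ne.symm h5, Ne.symm h6,
      Ne.symm h7, Ne.symm h8, Ne.symm h9, Ne.symm h10, Ne.symm h11]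
  rw [hA, hB]
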